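-- pv_equiv track=rewrite | github.com/tkgaolol/brushcode_juejin | 43.py | solution
-- ===== SOURCE A (Python) =====
-- def solution(str1):
--     n = len(str1)
--
--     # 从长度1开始尝试所有可能的前缀
--     for length in range(1, n + 1):
--         prefix = str1[:length]
--         current = prefix
--
--         # 模拟追加操作
--         while len(current) < n:
--             # 尝试所有可能的K值
--             found = False
--             for k in range(len(current)):
--                 next_str = current + current[k:]
--                 if str1.startswith(next_str):
--                     current = next_str
--                     found = True
--                     break
--
--             # 如果没有找到有效的K值，说明当前前缀不可能是答案
--             if not found:
--                 break
--
--         # 如果生成的字符串等于目标字符串，我们找到了答案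
--         if current == str1:
--             return prefix
--
--     # 如果没有找到答案，返回原字符串
--     return str1
-- ===== SOURCE B (Python) =====
-- def solution(str1):
--     s = str1
--     n = len(s)
--     # ok[m]: starting from matched prefix length m, the greedy append process
--     # reaches n.  Computed ONCE, right to left (each state m has a unique greedy
--     # successor m+p, so ok[m] = ok[m+p]); every candidate length is then a mere
--     # table lookup instead of A's full re-simulation per candidate prefix.
--     ok = [False] * (n + 1)
--     ok[n] = True
--     for m in range(n - 1, 0, -1):
--         # greedy smallest k = largest extension p = m - k, feasible p <= min(m, n-m);
--         # the appended suffix matches iff s[m-p:m] == s[m:m+p]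
--         nxt = None
--         for p in range(min(m, n - m), 0, -1):
--             if s[m - p:m] == s[m:m + p]:
--                 nxt = m + p
--                 break
--         ok[m] = nxt is not None and ok[nxt]
--     for length in range(1, n + 1):
--         if ok[length]:
--             return s[:length]
--     return s
-- ===== Notes on version B (the rewrite author's own statement) =====
-- stated objective: faster
-- what changed: B inverts A's control structure: instead of re-running the whole greedy append simulation for every candidate prefix length, B notes each matched length m has a unique greedy successor m+p (largest p with s[m-p:m]==s[m:m+p]), fills one right-to-left DP table ok[m] recording whether the process started at m reaches n, and answers each candidate length by a table lookup; it also never builds candidate strings, comparing only the appended segment.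
import Mathlib
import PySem

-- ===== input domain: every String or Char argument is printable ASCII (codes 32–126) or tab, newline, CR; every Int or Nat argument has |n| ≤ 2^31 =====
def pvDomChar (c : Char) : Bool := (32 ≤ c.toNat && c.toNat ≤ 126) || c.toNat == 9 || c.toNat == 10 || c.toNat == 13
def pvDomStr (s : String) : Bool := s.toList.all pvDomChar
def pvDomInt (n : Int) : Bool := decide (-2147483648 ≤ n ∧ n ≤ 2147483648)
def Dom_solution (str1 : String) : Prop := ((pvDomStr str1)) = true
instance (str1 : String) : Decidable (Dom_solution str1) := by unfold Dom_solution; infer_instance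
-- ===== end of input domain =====

-- B replaces A's per-candidate re-simulation with a single right-to-left DP table
-- ok[m] (= the greedy process starting from matched length m reaches n), so every
-- candidate prefix length is a table lookup; objective: faster.

-- ===== PORT A =====
-- A ported over List Char: str1[:length] is List.take (0 ≤ length ≤ n, exact),
-- str1.startswith(t) is exactly `t <+: s`, string + is List.append.

-- first k in range(len(current)) with str1.startswith(current + current[k:]), mapped to that next_str
def pvFindA (s current : List Char) : Option (List Char) :=
  ((List.range current.length).find? (fun k => decide ((current ++ current.drop k) <+: s))).map
    (fun k => current ++ current.drop k)

-- needed by pvSimA's termination proof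
theorem pvFindA_some {s current nx : List Char} (h : pvFindA s current = some nx) :
    current.length < nx.length ∧ nx.length ≤ s.length := by
  unfold pvFindA at h
  rcases Option.map_eq_some_iff.mp h with ⟨k, hk, rfl⟩
  have hmem := List.mem_of_find?_eq_some hk
  have hklt : k < current.length := List.mem_range.mp hmem
  have hpre : (current ++ current.drop k) <+: s := by
    have := List.find?_some hk; simpa using this
  refine ⟨?_, hpre.length_le⟩
  simp [List.length_append, List.length_drop]; omega

-- the inner `while len(current) < n` loop of A
def pvSimA (s current : List Char) : List Char :=
  if current.length < s.length then
    match hf : pvFindA s current with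
    | some nx => pvSimA s nx
    | none => current
  else current
termination_by s.length - current.length
decreasing_by
  have := pvFindA_some hf; omega

def solution (str1 : String) : String :=
  match (List.range' 1 str1.toList.length).findSome? (fun len =>
      if pvSimA str1.toList (str1.toList.take len) = str1.toList
      then some (str1.toList.take len) else none) with
  | some p => String.ofList p
  | none => str1

-- ===== PORT B =====
-- Source B's inner for-p loop: range(min(m, n-m), 0, -1) is (List.range' 1 (min m (n-m))).reverse,
-- the slice test s[m-p:m] == s[m:m+p] is (s.drop (m-p)).take p = (s.drop m).take p
-- (all indices in range: 1 ≤ p ≤ m ≤ n, m+p ≤ n); the found p is stored by Source B as nxt = m+p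
def pvMaxP (s : List Char) (m : Nat) : Option Nat :=
  ((List.range' 1 (min m (s.length - m))).reverse).find?
    (fun p => decide ((s.drop (m - p)).take p = (s.drop m).take p))

-- Source B's table: ok = [False]*(n+1); ok[n] = True; then m from n-1 down to 1
-- (range(n-1,0,-1) is (List.range' 1 (n-1)).reverse), each step
-- ok[m] = (nxt is not None) and ok[nxt]  with nxt = m + p from pvMaxP
def pvOkTable (s : List Char) : List Bool :=
  (List.range' 1 (s.length - 1)).reverse.foldl
    (fun ok m => ok.set m (match pvMaxP s m with
      | some p => ok[m + p]!
      | none => false))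
    ((List.replicate (s.length + 1) false).set s.length true)

-- final loop: first length in range(1, n+1) with ok[length], returning s[:length], else s
-- (Source B's local names s = str1 and ok = the table are inlined; pvOkTable is pure)
def solution_alt (str1 : String) : String :=
  match (List.range' 1 str1.toList.length).find? (fun len => (pvOkTable str1.toList)[len]!) with
  | some len => String.ofList (str1.toList.take len)
  | none => str1

-- ===== PRECONDITION & SPEC =====
def Spec_solution (str1 : String) (out : String) : Prop := out = solution_alt str1
instance (str1 : String) (out : String) : Decidable (Spec_solution str1 out) := by unfold Spec_solution; infer_instance

-- ===== CLAIM (what is proved, stated in full; the proofs are below) =====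
def Claim_equal_solution : Prop := ∀ (str1 : String), Dom_solution str1 → Spec_solution str1 (solution str1)

-- ===== LEMMAS AND PROOFS =====

-- A's candidate test, characterised by the slice equality B uses (k = m - p)
theorem pred_iff (s : List Char) (m k : Nat) (hm : m ≤ s.length) (hk : k < m) :
    ((s.take m ++ (s.take m).drop k) <+: s) ↔
      (2 * m - s.length ≤ k ∧ (s.drop k).take (m - k) = (s.drop m).take (m - k)) := by
  have hcl : (s.take m).length = m := by simp [hm]
  have htl : (s.take m ++ (s.take m).drop k).length = 2 * m - k := by
    simp [hm]; omega
  constructor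
  · intro hpre
    have hn : 2 * m - k ≤ s.length := htl ▸ hpre.length_le
    refine ⟨by omega, ?_⟩
    apply List.ext_getElem
    · simp; omega
    · intro i h1 h2
      have hi : i < m - k := by simp at h1; omega
      rw [List.getElem_take, List.getElem_drop, List.getElem_take, List.getElem_drop]
      have hidx : m + i < (s.take m ++ (s.take m).drop k).length := by rw [htl]; omega
      have h1' := hpre.getElem hidx
      rw [List.getElem_append_right (by rw [hcl]; omega)] at h1'
      rw [List.getElem_drop] at h1'
      rw [List.getElem_take] at h1'
      exact (getElem_congr_idx (by rw [hcl]; omega)).trans h1'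
  · rintro ⟨hlo, hsl⟩
    have hn : 2 * m - k ≤ s.length := by omega
    have hlen1 : ((s.drop k).take (m - k)).length = m - k := by simp; omega
    have hpt : ∀ i, i < m - k → ∀ (hb1 : k + i < s.length) (hb2 : m + i < s.length),
        s[k + i] = s[m + i] := by
      intro i hi hb1 hb2
      have h1 : i < ((s.drop k).take (m - k)).length := by rw [hlen1]; omega
      have h2 := List.getElem_of_eq hsl h1
      rw [List.getElem_take, List.getElem_drop, List.getElem_take, List.getElem_drop] at h2
      exact h2
    have heq : s.take m ++ (s.take m).drop k = s.take (2 * m - k) := by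
      apply List.ext_getElem
      · rw [htl]; simp; omega
      · intro a h1 h2
        by_cases ha : a < m
        · rw [List.getElem_append_left (by rw [hcl]; omega)]
          rw [List.getElem_take, List.getElem_take]
        · rw [List.getElem_append_right (by rw [hcl]; omega)]
          rw [List.getElem_drop, List.getElem_take, List.getElem_take]
          have ht : a - m < m - k := by rw [htl] at h1; omega
          have h3 := hpt (a - m) ht (by omega) (by omega)
          exact ((getElem_congr_idx (by rw [hcl])).trans h3).trans (getElem_congr_idx (by omega))
    rw [heq]
    exact List.take_prefix _ _

theorem find?_congr' {α : Type} (l : List α) (p q : α → Bool)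
    (h : ∀ a ∈ l, p a = q a) : l.find? p = l.find? q := by
  induction l with
  | nil => rfl
  | cons a l ih =>
    simp only [List.find?_cons]
    rw [h a (by simp)]
    cases q a <;> simp_all

-- a find? over range m where the predicate is false below lo scans only [lo, m)
theorem find?_range_from (p : Nat → Bool) (lo m : Nat) (hlo : lo ≤ m)
    (hfalse : ∀ k, k < lo → p k = false) :
    (List.range m).find? p = (List.range' lo (m - lo)).find? p := by
  induction lo with
  | zero => rw [List.range_eq_range']; simp
  | succ lo ih =>
    rw [ih (by omega) (fun k hk => hfalse k (by omega))]
    have hml : m - lo = (m - (lo + 1)) + 1 := by omega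
    rw [hml, List.range'_succ, List.find?_cons_of_neg (by simp [hfalse lo (by omega)])]

-- [lo, m) ascending in k is the image of [1..len] descending in p under k = m - p
theorem range'_eq_rev_map (m len : Nat) (hlen : len ≤ m) :
    List.range' (m - len) len = ((List.range' 1 len).reverse.map (fun p => m - p)) := by
  apply List.ext_getElem
  · simp
  · intro i h1 h2
    simp only [List.length_range', List.length_map, List.length_reverse] at h1 h2
    simp only [List.getElem_map, List.getElem_reverse, List.length_range', List.getElem_range']
    omega

-- membership facts about pvMaxP's result
theorem pvMaxP_some {s : List Char} {m p : Nat} (h : pvMaxP s m = some p) :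
    1 ≤ p ∧ p ≤ m ∧ p ≤ s.length - m := by
  unfold pvMaxP at h
  have hmem := List.mem_of_find?_eq_some h
  rw [List.mem_reverse] at hmem
  have := List.mem_range'_1.mp hmem
  omega

-- A's inner search at state s[:m] is exactly B's inner search at state m
theorem findA_eq (s : List Char) (m : Nat) (hm : m ≤ s.length) :
    pvFindA s (s.take m) = (pvMaxP s m).map (fun p => s.take (m + p)) := by
  have hcl : (s.take m).length = m := by simp [hm]
  have hlen : m - (2 * m - s.length) = min m (s.length - m) := by omega
  have hlo : m - (min m (s.length - m)) = 2 * m - s.length := by omega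
  unfold pvFindA pvMaxP
  rw [hcl]
  rw [find?_range_from _ (2 * m - s.length) m (by omega)
      (fun k hk => decide_eq_false (fun hpre =>
        absurd ((pred_iff s m k hm (by omega)).mp hpre).1 (by omega)))]
  rw [hlen, ← hlo, range'_eq_rev_map m (min m (s.length - m)) (by omega)]
  rw [List.find?_map, Option.map_map]
  rw [find?_congr' _ _ (fun p => decide ((s.drop (m - p)).take p = (s.drop m).take p))
      (fun p hp => by
        have hpm : 1 ≤ p ∧ p ≤ min m (s.length - m) := by
          rw [List.mem_reverse] at hp; have := List.mem_range'_1.mp hp; omega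
        have hmk : m - (m - p) = p := by omega
        have hiff : ((s.take m ++ (s.take m).drop (m - p)) <+: s) ↔
            ((s.drop (m - p)).take p = (s.drop m).take p) := by
          rw [pred_iff s m (m - p) hm (by omega), hmk]
          exact and_iff_right (by omega)
        simp only [Function.comp_apply, decide_eq_decide]
        exact hiff)]
  cases hfind : ((List.range' 1 (min m (s.length - m))).reverse).find?
      (fun p => decide ((s.drop (m - p)).take p = (s.drop m).take p)) with
  | none => rfl
  | some p =>
    have hpm : 1 ≤ p ∧ p ≤ min m (s.length - m) := by
      have hp := List.mem_of_find?_eq_some hfind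
      rw [List.mem_reverse] at hp; have := List.mem_range'_1.mp hp; omega
    have hps : (s.drop (m - p)).take p = (s.drop m).take p := by
      simpa using List.find?_some hfind
    have hmk : m - (m - p) = p := by omega
    have hpre : (s.take m ++ (s.take m).drop (m - p)) <+: s :=
      (pred_iff s m (m - p) hm (by omega)).mpr ⟨by omega, by rw [hmk]; exact hps⟩
    simp only [Option.map_some, Function.comp_apply]
    congr 1
    rw [List.prefix_iff_eq_take.mp hpre]
    congr 1
    simp [hm]; omega

-- the pure transition view of the process: reachability of n from state m
def pvReach (s : List Char) (m : Nat) : Bool :=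
  if m < s.length then
    match hf : pvMaxP s m with
    | some p => pvReach s (m + p)
    | none => false
  else decide (m = s.length)
termination_by s.length - m
decreasing_by
  have := pvMaxP_some hf; omega

theorem pvSimA_stop {s cur : List Char} (h : ¬ cur.length < s.length) :
    pvSimA s cur = cur := by
  rw [pvSimA, if_neg h]

theorem pvSimA_step_none {s cur : List Char} (hlt : cur.length < s.length)
    (h : pvFindA s cur = none) : pvSimA s cur = cur := by
  rw [pvSimA, if_pos hlt]
  split
  · rename_i nx' h'; rw [h] at h'; cases h'
  · rfl

theorem pvSimA_step_some {s cur nx : List Char} (hlt : cur.length < s.length)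
    (h : pvFindA s cur = some nx) : pvSimA s cur = pvSimA s nx := by
  rw [pvSimA, if_pos hlt]
  split
  · rename_i nx' h'; rw [h] at h'; injection h' with h''; rw [h'']
  · rename_i h'; rw [h] at h'; cases h'

theorem pvReach_stop {s : List Char} {m : Nat} (h : ¬ m < s.length) :
    pvReach s m = decide (m = s.length) := by
  rw [pvReach, if_neg h]

theorem pvReach_step_none {s : List Char} {m : Nat} (hlt : m < s.length)
    (h : pvMaxP s m = none) : pvReach s m = false := by
  rw [pvReach, if_pos hlt]
  split
  · rename_i p' h'; rw [h] at h'; cases h'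
  · rfl

theorem pvReach_step_some {s : List Char} {m p : Nat} (hlt : m < s.length)
    (h : pvMaxP s m = some p) : pvReach s m = pvReach s (m + p) := by
  rw [pvReach, if_pos hlt]
  split
  · rename_i p' h'; rw [h] at h'; injection h' with h''; rw [h'']
  · rename_i h'; rw [h] at h'; cases h'

-- A's simulation from s[:m] ends in s exactly when n is reachable from m
theorem sim_reach (s : List Char) (m : Nat) (hm : m ≤ s.length) :
    (decide (pvSimA s (s.take m) = s)) = pvReach s m := by
  have H : ∀ fuel m, m ≤ s.length → s.length - m ≤ fuel →
      (decide (pvSimA s (s.take m) = s)) = pvReach s m := by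
    intro fuel
    induction fuel with
    | zero =>
      intro m hm hf
      have hme : m = s.length := by omega
      have hcl : (s.take m).length = m := by simp [hm]
      rw [pvSimA_stop (by omega), pvReach_stop (by omega)]
      subst hme; simp
    | succ fuel ih =>
      intro m hm hf
      have hcl : (s.take m).length = m := by simp [hm]
      by_cases hlt : m < s.length
      · cases hstep : pvMaxP s m with
        | none =>
          have hfa : pvFindA s (s.take m) = none := by
            rw [findA_eq s m hm, hstep]; rfl
          rw [pvSimA_step_none (by omega) hfa, pvReach_step_none hlt hstep]
          apply decide_eq_false
          intro hc
          have := congrArg List.length hc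
          rw [hcl] at this; omega
        | some p =>
          have hps := pvMaxP_some hstep
          have hfa : pvFindA s (s.take m) = some (s.take (m + p)) := by
            rw [findA_eq s m hm, hstep]; rfl
          rw [pvSimA_step_some (by omega) hfa, pvReach_step_some hlt hstep]
          exact ih (m + p) (by omega) (by omega)
      · have hme : m = s.length := by omega
        rw [pvSimA_stop (by omega), pvReach_stop (by omega)]
        subst hme; simp
  exact H (s.length - m) m hm le_rfl

-- the fold building pvOkTable keeps length n+1 and fills indices [1..j] correctly,
-- given the indices above j are already correct
theorem okTable_inv (s : List Char) :
    ∀ j (a : List Bool), j < s.length → a.length = s.length + 1 →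
      (∀ i, j < i → i ≤ s.length → a[i]! = pvReach s i) →
      (((List.range' 1 j).reverse.foldl
          (fun ok m => ok.set m (match pvMaxP s m with
            | some p => ok[m + p]!
            | none => false)) a).length = s.length + 1 ∧
        ∀ i, 0 < i → i ≤ s.length →
          ((List.range' 1 j).reverse.foldl
            (fun ok m => ok.set m (match pvMaxP s m with
              | some p => ok[m + p]!
              | none => false)) a)[i]! = pvReach s i) := by
  intro j
  induction j with
  | zero =>
    intro a hj ha hinv
    exact ⟨by simpa using ha, fun i hi1 hi2 => by simpa using hinv i hi1 hi2⟩
  | succ j ih =>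
    intro a hj ha hinv
    rw [List.range'_1_concat, List.reverse_append]
    simp only [List.reverse_singleton, List.singleton_append, List.foldl_cons]
    set v : Bool := (match pvMaxP s (1 + j) with
      | some p => a[1 + j + p]!
      | none => false) with hv
    have hj1 : 1 + j < s.length := by omega
    have hvr : v = pvReach s (1 + j) := by
      cases hstep : pvMaxP s (1 + j) with
      | none => rw [hv, hstep, pvReach_step_none hj1 hstep]
      | some p =>
        have hps := pvMaxP_some hstep
        rw [hv, hstep, pvReach_step_some hj1 hstep]
        exact hinv (1 + j + p) (by omega) (by omega)
    apply ih (a.set (1 + j) v) (by omega) (by simpa using ha)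
    intro i hi1 hi2
    by_cases hieq : i = 1 + j
    · subst hieq
      rw [getElem!_pos _ _ (by simp [ha]; omega), List.getElem_set_self, hvr]
    · rw [getElem!_pos _ _ (by simp [ha]; omega), List.getElem_set_ne (by omega),
        ← getElem!_pos _ _ (by rw [ha]; omega)]
      exact hinv i (by omega) hi2

-- the finished table agrees with pvReach on all indices 1..n
theorem okTable_correct (s : List Char) (i : Nat) (hi1 : 0 < i) (hi2 : i ≤ s.length) :
    (pvOkTable s)[i]! = pvReach s i := by
  have hn : 0 < s.length := by omega
  have hinit : ∀ i, s.length - 1 < i → i ≤ s.length →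
      ((List.replicate (s.length + 1) false).set s.length true)[i]! = pvReach s i := by
    intro i h1 h2
    have hie : i = s.length := by omega
    subst hie
    rw [getElem!_pos _ _ (by simp), List.getElem_set_self, pvReach_stop (by omega)]
    simp
  exact (okTable_inv s (s.length - 1) _ (by omega) (by simp) hinit).2 i hi1 hi2

theorem findSome?_guard {α β : Type} (l : List α) (P : α → Prop) [DecidablePred P] (g : α → β) :
    l.findSome? (fun x => if P x then some (g x) else none)
      = (l.find? (fun x => decide (P x))).map g := by
  induction l with
  | nil => rfl
  | cons a l ih =>
    simp only [List.findSome?_cons, List.find?_cons]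
    by_cases h : P a <;> simp [h, ih]

-- ===== VERDICT (by name: the statement is the Claim_ definition above) =====
theorem solution_spec : Claim_equal_solution := by
  intro str1 _
  unfold Spec_solution solution solution_alt
  have hg : (List.range' 1 str1.toList.length).findSome? (fun len =>
        if pvSimA str1.toList (str1.toList.take len) = str1.toList
        then some (str1.toList.take len) else none)
      = ((List.range' 1 str1.toList.length).find?
          (fun len => (pvOkTable str1.toList)[len]!)).map (fun len => str1.toList.take len) := by
    rw [findSome?_guard (List.range' 1 str1.toList.length)
        (fun len => pvSimA str1.toList (str1.toList.take len) = str1.toList)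
        (fun len => str1.toList.take len)]
    congr 1
    apply find?_congr'
    intro len hlen
    have hr := List.mem_range'_1.mp hlen
    rw [sim_reach str1.toList len (by omega)]
    exact (okTable_correct str1.toList len (by omega) (by omega)).symm
  rw [hg]
  cases (List.range' 1 str1.toList.length).find?
      (fun len => (pvOkTable str1.toList)[len]!) with
  | none => rfl
  | some len => rfl
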